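-- pv_equiv track=rewrite | github.com/multivac61/aoc | year/2017.py | build_bridges
-- ===== SOURCE A (Python) =====
-- def build_bridges(components, current_port=0, used=None):
--     """Build all possible bridges."""
--     if used is None:
--         used = set()
--
--     max_strength = 0
--
--     for i, (port1, port2) in enumerate(components):
--         if i in used:
--             continue
--
--         if port1 == current_port:
--             next_port = port2
--         elif port2 == current_port:
--             next_port = port1
--         else:
--             continue
--
--         new_used = used | {i}
--         bridge_strength = port1 + port2 + build_bridges(components, next_port, new_used)
--         max_strength = max(max_strength, bridge_strength)
--
--     return max_strength
-- ===== SOURCE B (Python) =====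
-- def build_bridges(components, current_port=0, used=None):
--     """Strongest bridge via an explicit-stack DFS instead of recursion."""
--     best = 0
--     stack = [(current_port, frozenset() if used is None else frozenset(used), 0)]
--     while stack:
--         port, used_s, acc = stack.pop()
--         if acc > best:
--             best = acc
--         for i, (p1, p2) in enumerate(components):
--             if i in used_s:
--                 continue
--             if p1 == port:
--                 nxt = p2
--             elif p2 == port:
--                 nxt = p1
--             else:
--                 continue
--             stack.append((nxt, used_s | {i}, acc + p1 + p2))
--     return best
-- ===== Notes on version B (the rewrite author's own statement) =====
-- stated objective: alternative
-- what changed: Replaced A's recursive exhaustive search (recursion returning the best extension of the current bridge) by an explicit iterative DFS: a stack of (port, used, accumulated-strength) states and a running best, updated at every popped state.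
import Mathlib
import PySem

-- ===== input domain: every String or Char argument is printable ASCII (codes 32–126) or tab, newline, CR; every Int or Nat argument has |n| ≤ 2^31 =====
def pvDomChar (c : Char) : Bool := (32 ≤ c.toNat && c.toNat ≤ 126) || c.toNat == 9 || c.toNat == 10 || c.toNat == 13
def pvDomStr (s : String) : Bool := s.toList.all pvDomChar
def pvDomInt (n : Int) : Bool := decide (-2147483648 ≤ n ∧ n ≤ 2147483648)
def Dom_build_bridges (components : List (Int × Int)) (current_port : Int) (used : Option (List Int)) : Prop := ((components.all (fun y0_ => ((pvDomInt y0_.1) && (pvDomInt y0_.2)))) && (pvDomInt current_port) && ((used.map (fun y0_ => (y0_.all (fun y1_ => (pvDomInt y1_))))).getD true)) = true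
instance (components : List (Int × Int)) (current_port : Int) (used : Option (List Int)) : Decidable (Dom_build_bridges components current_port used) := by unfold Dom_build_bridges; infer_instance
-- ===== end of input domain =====

-- B replaces A's recursive exhaustive search (recursion returning the best extension of the
-- current bridge) by an explicit iterative DFS: a stack of (port, used, strength) states and a
-- running best (objective: alternative decomposition); the return values are proved equal.

-- shared conversion of the `used` argument (None → empty set, a set given as its element list)
def pvUsed0 (used : Option (List Int)) : PySem.Set Int :=
  match used with
  | none => PySem.Set.empty
  | some l => PySem.Set.ofList l

-- number of component indices not yet in `used` (bounds A's recursion depth; measures B's stack)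
def pvFreeN (n : Nat) (used : PySem.Set Int) : Nat :=
  ((PySem.List.pyRange 0 (n : Int)).filter (fun k => !decide (k ∈ used))).length

theorem pvCount_add (used : PySem.Set Int) (j : Int) (hm : j ∉ used) :
    ∀ l : List Int, l.Nodup → j ∈ l →
      (l.filter (fun k => !decide (k ∈ PySem.Set.add used j))).length + 1 =
        (l.filter (fun k => !decide (k ∈ used))).length := by
  intro l
  induction l with
  | nil => intro _ hj; cases hj
  | cons x t ih =>
    intro hnd hj
    obtain ⟨hx, hnd'⟩ := List.nodup_cons.mp hnd
    by_cases hxj : x = j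
    · subst hxj
      have hmem : x ∈ PySem.Set.add used x := by
        rw [PySem.Set.mem_add]; exact Or.inr rfl
      have hcongr : t.filter (fun k => !decide (k ∈ PySem.Set.add used x)) =
          t.filter (fun k => !decide (k ∈ used)) := by
        apply List.filter_congr
        intro k hk
        have hkj : k ≠ x := by rintro rfl; exact hx hk
        have hiff : (k ∈ PySem.Set.add used x) ↔ k ∈ used := by
          rw [PySem.Set.mem_add]
          exact ⟨fun h => h.elim id (fun h => absurd h hkj), Or.inl⟩
        simp [hiff]
      rw [List.filter_cons, List.filter_cons, if_neg (by simp [hmem]), if_pos (by simp [hm]),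
        hcongr, List.length_cons]
    · have hjt : j ∈ t := by
        rcases List.mem_cons.mp hj with h | h
        · exact absurd h.symm hxj
        · exact h
      have hiff : (x ∈ PySem.Set.add used j) ↔ x ∈ used := by
        rw [PySem.Set.mem_add]
        exact ⟨fun h => h.elim id (fun h => absurd h hxj), Or.inl⟩
      have hrec := ih hnd' hjt
      rw [List.filter_cons, List.filter_cons]
      by_cases hxu : x ∈ used
      · rw [if_neg (by simp [hiff.mpr hxu]), if_neg (by simp [hxu])]
        exact hrec
      · rw [if_pos (by simp [hxu, hxj]), if_pos (by simp [hxu])]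
        simp only [List.length_cons]
        omega

theorem pyRange_cast (n : Nat) :
    PySem.List.pyRange 0 (n : Int) = (List.range n).map (fun k : Nat => (k : Int)) :=
  PySem.List.pyRange_zero_natCast n

theorem pvFreeN_add (n k : Nat) (used : PySem.Set Int) (hk : k < n) (hm : (k : Int) ∉ used) :
    pvFreeN n (PySem.Set.add used (k : Int)) + 1 = pvFreeN n used := by
  apply pvCount_add used (k : Int) hm (PySem.List.pyRange 0 (n : Int))
  · rw [pyRange_cast]
    exact (List.nodup_range).map (fun a b h => by exact_mod_cast h)
  · rw [pyRange_cast]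
    exact List.mem_map.mpr ⟨k, List.mem_range.mpr hk, rfl⟩

-- ===== PORT A =====
-- A's `for i,(p1,p2) in enumerate(components)` loop folds the running max_strength; the
-- recursive call build_bridges(components, next_port, used|{i}) descends with one unit of fuel
-- (fuel components.length+1 always suffices: every call adds a fresh in-range index to `used`,
-- so the recursion depth is bounded by pvFreeN and the 0 branch is never reached; proved by
-- auxA_ad below).
def auxA (components : List (Int × Int)) : Nat → Int → PySem.Set Int → Int
  | 0, _, _ => 0
  | fuel + 1, cp, used =>
    (PySem.List.enumerate components).foldl
      (fun acc p =>
        if p.1 ∈ used then acc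
        else if p.2.1 = cp then
          max acc (p.2.1 + p.2.2 + auxA components fuel p.2.2 (PySem.Set.add used p.1))
        else if p.2.2 = cp then
          max acc (p.2.1 + p.2.2 + auxA components fuel p.2.1 (PySem.Set.add used p.1))
        else acc)
      0

def build_bridges (components : List (Int × Int)) (current_port : Int) (used : Option (List Int)) : Int :=
  auxA components (components.length + 1) current_port (pvUsed0 used)

-- ===== PORT B =====
-- B's inner `for i,(p1,p2) in enumerate(components)` appending eligible successor states;
-- list head = top of stack, so consing in increasing i leaves the last append on top, like
-- Python's append/pop().
def pushAll (components : List (Int × Int)) (port : Int) (used : PySem.Set Int) (acc : Int)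
    (stack : List (Int × PySem.Set Int × Int)) : List (Int × PySem.Set Int × Int) :=
  (PySem.List.enumerate components).foldl
    (fun st p =>
      if p.1 ∈ used then st
      else if p.2.1 = port then (p.2.2, PySem.Set.add used p.1, acc + p.2.1 + p.2.2) :: st
      else if p.2.2 = port then (p.2.1, PySem.Set.add used p.1, acc + p.2.1 + p.2.2) :: st
      else st)
    stack

-- the successor state B's inner loop pushes at entry p (lets us reason about pushAll)
def childOf (port : Int) (used : PySem.Set Int) (acc : Int)
    (p : Int × (Int × Int)) : Option (Int × PySem.Set Int × Int) :=
  if p.1 ∈ used then none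
  else if p.2.1 = port then some (p.2.2, PySem.Set.add used p.1, acc + p.2.1 + p.2.2)
  else if p.2.2 = port then some (p.2.1, PySem.Set.add used p.1, acc + p.2.1 + p.2.2)
  else none

theorem foldB (port : Int) (used : PySem.Set Int) (acc : Int) :
    ∀ (l : List (Int × (Int × Int))) (stack : List (Int × PySem.Set Int × Int)),
      l.foldl
          (fun st p =>
            if p.1 ∈ used then st
            else if p.2.1 = port then (p.2.2, PySem.Set.add used p.1, acc + p.2.1 + p.2.2) :: st
            else if p.2.2 = port then (p.2.1, PySem.Set.add used p.1, acc + p.2.1 + p.2.2) :: st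
            else st)
          stack =
        (l.filterMap (childOf port used acc)).reverse ++ stack := by
  intro l
  induction l with
  | nil => intro stack; rfl
  | cons p t ih =>
    intro stack
    simp only [List.foldl_cons, List.filterMap_cons]
    by_cases hu : p.1 ∈ used
    · simp [childOf, hu, ih]
    · by_cases h1 : p.2.1 = port
      · simp [childOf, hu, h1, ih]
      · by_cases h2 : p.2.2 = port
        · simp [childOf, hu, h1, h2, ih]
        · simp [childOf, hu, h1, h2, ih]

theorem pushAll_eq (components : List (Int × Int)) (port : Int) (used : PySem.Set Int)
    (acc : Int) (stack : List (Int × PySem.Set Int × Int)) :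
    pushAll components port used acc stack =
      ((PySem.List.enumerate components).filterMap (childOf port used acc)).reverse ++ stack :=
  foldB port used acc (PySem.List.enumerate components) stack

-- termination measure for B's while-loop: Σ over the stack of (free-count + 1)!
def pvStackM (components : List (Int × Int)) (stack : List (Int × PySem.Set Int × Int)) : Nat :=
  (stack.map (fun s => Nat.factorial (pvFreeN components.length s.2.1 + 1))).sum

theorem pvStackM_append (components : List (Int × Int))
    (xs ys : List (Int × PySem.Set Int × Int)) :
    pvStackM components (xs ++ ys) = pvStackM components xs + pvStackM components ys := by
  simp [pvStackM]

theorem pvStackM_reverse (components : List (Int × Int))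
    (xs : List (Int × PySem.Set Int × Int)) :
    pvStackM components xs.reverse = pvStackM components xs := by
  simp [pvStackM]

theorem children_le (port : Int) (used : PySem.Set Int) (acc : Int) :
    ∀ l : List (Int × (Int × Int)),
      (l.filterMap (childOf port used acc)).length ≤
        l.countP (fun p => !decide (p.1 ∈ used)) := by
  intro l
  induction l with
  | nil => simp
  | cons p t ih =>
    simp only [List.filterMap_cons, List.countP_cons]
    by_cases hu : p.1 ∈ used
    · simp [childOf, hu] at ih ⊢
      omega
    · by_cases h1 : p.2.1 = port
      · simp [childOf, hu, h1] at ih ⊢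
        omega
      · by_cases h2 : p.2.2 = port
        · simp [childOf, hu, h1, h2] at ih ⊢
          omega
        · simp [childOf, hu, h1, h2] at ih ⊢
          omega

theorem enumerate_ranged (components : List (Int × Int)) :
    ∀ p ∈ PySem.List.enumerate components, ∃ k : Nat, k < components.length ∧ p.1 = (k : Int) := by
  intro p hp
  obtain ⟨k, hk, hpe⟩ := (PySem.List.mem_enumerate_iff components 0 p).mp hp
  exact ⟨k, hk, by rw [hpe]; simp⟩

theorem children_fact (components : List (Int × Int)) (port : Int) (used : PySem.Set Int)
    (acc : Int) (l : List (Int × (Int × Int)))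
    (hl : ∀ p ∈ l, ∃ k : Nat, k < components.length ∧ p.1 = (k : Int)) :
    ∀ s ∈ l.filterMap (childOf port used acc),
      Nat.factorial (pvFreeN components.length s.2.1 + 1) =
        Nat.factorial (pvFreeN components.length used) := by
  intro s hs
  obtain ⟨p, hp, hfs⟩ := List.mem_filterMap.mp hs
  obtain ⟨k, hkn, hpk⟩ := hl p hp
  by_cases hu : p.1 ∈ used
  · simp [childOf, hu] at hfs
  · have hchild : pvFreeN components.length (PySem.Set.add used p.1) + 1 =
        pvFreeN components.length used :=
      hpk ▸ pvFreeN_add components.length k used hkn (hpk ▸ hu)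
    have hs21 : s.2.1 = PySem.Set.add used p.1 := by
      by_cases h1 : p.2.1 = port
      · simp only [childOf, if_neg hu, if_pos h1, Option.some.injEq] at hfs
        rw [← hfs]
      · by_cases h2 : p.2.2 = port
        · simp only [childOf, if_neg hu, if_neg h1, if_pos h2, Option.some.injEq] at hfs
          rw [← hfs]
        · simp [childOf, hu, h1, h2] at hfs
    rw [hs21, hchild]

theorem pvStackM_const (components : List (Int × Int)) (c : Nat) :
    ∀ l : List (Int × PySem.Set Int × Int),
      (∀ s ∈ l, Nat.factorial (pvFreeN components.length s.2.1 + 1) = c) →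
      pvStackM components l = l.length * c := by
  intro l
  induction l with
  | nil => intro _; simp [pvStackM]
  | cons s t ih =>
    intro h
    have hs := h s (List.mem_cons_self)
    have ht := ih (fun q hq => h q (List.mem_cons_of_mem s hq))
    simp only [pvStackM, List.map_cons, List.sum_cons] at *
    rw [hs, ht, List.length_cons, Nat.succ_mul]
    omega

theorem countP_enumerate_free (components : List (Int × Int)) (used : PySem.Set Int) :
    (PySem.List.enumerate components).countP (fun p => !decide (p.1 ∈ used)) =
      pvFreeN components.length used := by
  have h1 : (PySem.List.enumerate components).countP (fun p => !decide (p.1 ∈ used)) =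
      ((PySem.List.enumerate components).map (fun p => p.1)).countP (fun i => !decide (i ∈ used)) := by
    rw [List.countP_map]
    rfl
  rw [h1, PySem.List.map_fst_enumerate, zero_add, pvFreeN, List.countP_eq_length_filter]

theorem pvStackM_pop_lt (components : List (Int × Int)) (s : Int × PySem.Set Int × Int)
    (rest : List (Int × PySem.Set Int × Int)) :
    pvStackM components (pushAll components s.1 s.2.1 s.2.2 rest) <
      pvStackM components (s :: rest) := by
  rw [pushAll_eq, pvStackM_append, pvStackM_reverse]
  have hfm : pvStackM components
      ((PySem.List.enumerate components).filterMap (childOf s.1 s.2.1 s.2.2)) =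
      ((PySem.List.enumerate components).filterMap (childOf s.1 s.2.1 s.2.2)).length *
        Nat.factorial (pvFreeN components.length s.2.1) :=
    pvStackM_const components _ _
      (children_fact components s.1 s.2.1 s.2.2 _ (enumerate_ranged components))
  have hlen : ((PySem.List.enumerate components).filterMap (childOf s.1 s.2.1 s.2.2)).length ≤
      pvFreeN components.length s.2.1 := by
    have h := children_le s.1 s.2.1 s.2.2 (PySem.List.enumerate components)
    rw [countP_enumerate_free] at h
    exact h
  have hmul : ((PySem.List.enumerate components).filterMap (childOf s.1 s.2.1 s.2.2)).length *
      Nat.factorial (pvFreeN components.length s.2.1) ≤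
      pvFreeN components.length s.2.1 * Nat.factorial (pvFreeN components.length s.2.1) :=
    Nat.mul_le_mul_right _ hlen
  have hfac : pvFreeN components.length s.2.1 * Nat.factorial (pvFreeN components.length s.2.1) <
      Nat.factorial (pvFreeN components.length s.2.1 + 1) := by
    rw [Nat.factorial_succ]
    exact Nat.mul_lt_mul_of_lt_of_le (by omega) (le_refl _) (Nat.factorial_pos _)
  have hcons : pvStackM components (s :: rest) =
      Nat.factorial (pvFreeN components.length s.2.1 + 1) + pvStackM components rest := by
    simp [pvStackM]
  omega

-- B's while-loop: pop the head state, update best, push all eligible successor states.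
def loopB (components : List (Int × Int)) (stack : List (Int × PySem.Set Int × Int)) (best : Int) : Int :=
  match stack with
  | [] => best
  | s :: rest =>
    loopB components (pushAll components s.1 s.2.1 s.2.2 rest)
      (if best < s.2.2 then s.2.2 else best)
termination_by pvStackM components stack
decreasing_by exact pvStackM_pop_lt components s rest

def build_bridges_alt (components : List (Int × Int)) (current_port : Int) (used : Option (List Int)) : Int :=
  loopB components [(current_port, pvUsed0 used, 0)] 0

-- ===== PRECONDITION & SPEC =====
def Spec_build_bridges (components : List (Int × Int)) (current_port : Int) (used : Option (List Int)) (out : Int) : Prop := out = build_bridges_alt components current_port used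
instance (components : List (Int × Int)) (current_port : Int) (used : Option (List Int)) (out : Int) : Decidable (Spec_build_bridges components current_port used out) := by unfold Spec_build_bridges; infer_instance

-- ===== CLAIM (what is proved, stated in full; the proofs are below) =====
def Claim_equal_build_bridges : Prop := ∀ (components : List (Int × Int)) (current_port : Int) (used : Option (List Int)), Dom_build_bridges components current_port used → Spec_build_bridges components current_port used (build_bridges components current_port used)

-- ===== LEMMAS AND PROOFS =====

theorem pvFreeN_le (n : Nat) (used : PySem.Set Int) : pvFreeN n used ≤ n := by
  have h := List.length_filter_le (fun k => !decide (k ∈ used)) (PySem.List.pyRange 0 (n : Int))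
  have h2 : (PySem.List.pyRange 0 (n : Int)).length = n := by
    rw [pyRange_cast, List.length_map, List.length_range]
  rw [pvFreeN]
  omega

-- fuel adequacy: any fuel ≥ pvFreeN + 1 computes the same value as the canonical fuel
theorem auxA_ad (components : List (Int × Int)) (fuel : Nat) :
    ∀ (cp : Int) (used : PySem.Set Int), pvFreeN components.length used + 1 ≤ fuel →
      auxA components fuel cp used =
        auxA components (pvFreeN components.length used + 1) cp used := by
  induction fuel using Nat.strong_induction_on with
  | _ fuel ih =>
    intro cp used h
    obtain ⟨f, rfl⟩ : ∃ f, fuel = f + 1 := ⟨fuel - 1, by omega⟩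
    by_cases hf : f + 1 = pvFreeN components.length used + 1
    · rw [hf]
    · simp only [auxA]
      apply PySem.List.foldl_congr_mem
      intro acc p hp
      obtain ⟨k, hkn, hpk⟩ := enumerate_ranged components p hp
      by_cases hu : p.1 ∈ used
      · simp only [if_pos hu]
      · have hkm : (k : Int) ∉ used := hpk ▸ hu
        have hchild : pvFreeN components.length (PySem.Set.add used p.1) + 1 =
            pvFreeN components.length used := hpk ▸ pvFreeN_add components.length k used hkn hkm
        have hrw : ∀ nxt : Int, auxA components f nxt (PySem.Set.add used p.1) =
            auxA components (pvFreeN components.length used) nxt (PySem.Set.add used p.1) := by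
          intro nxt
          rw [ih f (by omega) nxt (PySem.Set.add used p.1) (by omega), ← hchild]
        by_cases h1 : p.2.1 = cp
        · simp only [if_neg hu, if_pos h1, hrw]
        · by_cases h2 : p.2.2 = cp
          · simp only [if_neg hu, if_neg h1, if_pos h2, hrw]
          · simp only [if_neg hu, if_neg h1, if_neg h2]

-- the value of A's search from a state, at its canonical fuel
def Abest (components : List (Int × Int)) (cp : Int) (used : PySem.Set Int) : Int :=
  auxA components (pvFreeN components.length used + 1) cp used

-- the candidate strength A's loop offers at entry p, at nested fuel pvFreeN used
def candVal (components : List (Int × Int)) (cp : Int) (used : PySem.Set Int)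
    (p : Int × (Int × Int)) : Option Int :=
  if p.1 ∈ used then none
  else if p.2.1 = cp then
    some (p.2.1 + p.2.2 +
      auxA components (pvFreeN components.length used) p.2.2 (PySem.Set.add used p.1))
  else if p.2.2 = cp then
    some (p.2.1 + p.2.2 +
      auxA components (pvFreeN components.length used) p.2.1 (PySem.Set.add used p.1))
  else none

theorem foldA (components : List (Int × Int)) (cp : Int) (used : PySem.Set Int) :
    ∀ (l : List (Int × (Int × Int))) (acc : Int),
      l.foldl
          (fun acc p =>
            if p.1 ∈ used then acc
            else if p.2.1 = cp then
              max acc (p.2.1 + p.2.2 +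
                auxA components (pvFreeN components.length used) p.2.2 (PySem.Set.add used p.1))
            else if p.2.2 = cp then
              max acc (p.2.1 + p.2.2 +
                auxA components (pvFreeN components.length used) p.2.1 (PySem.Set.add used p.1))
            else acc)
          acc =
        List.foldl max acc (l.filterMap (candVal components cp used)) := by
  intro l
  induction l with
  | nil => intro acc; rfl
  | cons p t ih =>
    intro acc
    simp only [List.foldl_cons, List.filterMap_cons]
    by_cases hu : p.1 ∈ used
    · simp [candVal, hu, ih]
    · by_cases h1 : p.2.1 = cp
      · simp [candVal, hu, h1, ih]
      · by_cases h2 : p.2.2 = cp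
        · simp [candVal, hu, h1, h2, ih]
        · simp [candVal, hu, h1, h2, ih]

theorem Abest_eq (components : List (Int × Int)) (cp : Int) (used : PySem.Set Int) :
    Abest components cp used =
      List.foldl max 0
        ((PySem.List.enumerate components).filterMap (candVal components cp used)) := by
  rw [Abest]
  simp only [auxA]
  exact foldA components cp used (PySem.List.enumerate components) 0

theorem Abest_nonneg (components : List (Int × Int)) (cp : Int) (used : PySem.Set Int) :
    0 ≤ Abest components cp used := by
  rw [Abest_eq]
  exact (PySem.List.le_foldl_max _ 0).1

theorem children_map (components : List (Int × Int)) (port : Int) (used : PySem.Set Int)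
    (acc : Int) :
    ∀ l : List (Int × (Int × Int)),
      (∀ p ∈ l, ∃ k : Nat, k < components.length ∧ p.1 = (k : Int)) →
      (l.filterMap (childOf port used acc)).map
          (fun s => s.2.2 + Abest components s.1 s.2.1) =
        (l.filterMap (candVal components port used)).map (fun x => acc + x) := by
  intro l
  induction l with
  | nil => intro _; rfl
  | cons p t ih =>
    intro hl
    obtain ⟨k, hkn, hpk⟩ := hl p (List.mem_cons_self)
    have hlt := fun q hq => hl q (List.mem_cons_of_mem p hq)
    by_cases hu : p.1 ∈ used
    · rw [List.filterMap_cons_none (by simp [childOf, hu]),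
        List.filterMap_cons_none (by simp [candVal, hu])]
      exact ih hlt
    · have hkm : (k : Int) ∉ used := hpk ▸ hu
      have hchild : pvFreeN components.length (PySem.Set.add used p.1) + 1 =
          pvFreeN components.length used := hpk ▸ pvFreeN_add components.length k used hkn hkm
      have hA : ∀ nxt : Int,
          Abest components nxt (PySem.Set.add used p.1) =
            auxA components (pvFreeN components.length used) nxt (PySem.Set.add used p.1) := by
        intro nxt
        rw [Abest, hchild]
      by_cases h1 : p.2.1 = port
      · rw [List.filterMap_cons_some
            (show childOf port used acc p =
                some (p.2.2, PySem.Set.add used p.1, acc + p.2.1 + p.2.2) by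
              simp [childOf, hu, h1]),
          List.filterMap_cons_some
            (show candVal components port used p =
                some (p.2.1 + p.2.2 +
                  auxA components (pvFreeN components.length used) p.2.2 (PySem.Set.add used p.1)) by
              simp [candVal, hu, h1]),
          List.map_cons, List.map_cons, ih hlt, hA]
        congr 1
        dsimp only
        omega
      · by_cases h2 : p.2.2 = port
        · rw [List.filterMap_cons_some
              (show childOf port used acc p =
                  some (p.2.1, PySem.Set.add used p.1, acc + p.2.1 + p.2.2) by
                simp [childOf, hu, h1, h2]),
            List.filterMap_cons_some
              (show candVal components port used p =
                  some (p.2.1 + p.2.2 +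
                    auxA components (pvFreeN components.length used) p.2.1 (PySem.Set.add used p.1)) by
                simp [candVal, hu, h1, h2]),
            List.map_cons, List.map_cons, ih hlt, hA]
          congr 1
          dsimp only
          omega
        · rw [List.filterMap_cons_none (by simp [childOf, hu, h1, h2]),
            List.filterMap_cons_none (by simp [candVal, hu, h1, h2])]
          exact ih hlt

theorem foldl_max_map_add (a : Int) (l : List Int) : ∀ (b c : Int),
    List.foldl max (max b (a + c)) (l.map (fun x => a + x)) =
      max b (a + List.foldl max c l) := by
  induction l with
  | nil => intro b c; simp
  | cons x t ih =>
    intro b c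
    simp only [List.map_cons, List.foldl_cons]
    have hstep : max (max b (a + c)) (a + x) = max b (a + max c x) := by
      omega
    rw [hstep, ih]

theorem foldl_max_reverse (b : Int) (l : List Int) :
    List.foldl max b l.reverse = List.foldl max b l :=
  (List.reverse_perm l).foldl_eq b

theorem loopB_eq (components : List (Int × Int)) (stack : List (Int × PySem.Set Int × Int))
    (best : Int) :
    loopB components stack best =
      List.foldl max best
        (stack.map (fun s => s.2.2 + Abest components s.1 s.2.1)) := by
  match stack with
  | [] => rw [loopB]; rfl
  | s :: rest =>
    rw [loopB]
    rw [loopB_eq components (pushAll components s.1 s.2.1 s.2.2 rest)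
      (if best < s.2.2 then s.2.2 else best)]
    rw [pushAll_eq]
    simp only [List.map_append, List.map_reverse, List.foldl_append, List.map_cons,
      List.foldl_cons]
    rw [foldl_max_reverse, children_map components s.1 s.2.1 s.2.2
      (PySem.List.enumerate components) (enumerate_ranged components)]
    have hb : (if best < s.2.2 then s.2.2 else best) = max best (s.2.2 + 0) := by omega
    rw [hb, foldl_max_map_add, ← Abest_eq]
termination_by pvStackM components stack
decreasing_by exact pvStackM_pop_lt components s rest

-- ===== VERDICT (by name: the statement is the Claim_ definition above) =====
theorem build_bridges_spec : Claim_equal_build_bridges := by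
  intro components cp used _hdom
  unfold Spec_build_bridges build_bridges build_bridges_alt
  rw [loopB_eq]
  simp only [List.map_cons, List.map_nil, List.foldl_cons, List.foldl_nil, zero_add]
  rw [auxA_ad components (components.length + 1) cp (pvUsed0 used)
    (by have := pvFreeN_le components.length (pvUsed0 used); omega)]
  have h0 : (0 : Int) ≤ Abest components cp (pvUsed0 used) :=
    Abest_nonneg components cp (pvUsed0 used)
  rw [← Abest]
  omega
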